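-- pv_equiv track=rewrite | github.com/sxm209/JFK-Files-Chatbot-AI | jfk_qa_chatbot.py | aggregate_citations
-- ===== SOURCE A (Python) =====
-- def aggregate_citations(chunks):
--     """
--     Collect unique citations from metadata chunks in a consistent formatted string.
--     """
--     seen = set()
--     citations = []
--     for chunk in chunks:
--         file_name = chunk.get('file_name', 'Unknown')
--         page_start = chunk.get('start_file', '?')
--         page_end = chunk.get('end_file', '?')
--         citation = f"[{file_name}] (Pages {page_start}–{page_end})"
--         if citation not in seen:
--             seen.add(citation)
--             citations.append(citation)
--     return "Sources: " + ", ".join(citations) if citations else "Sources: None"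
-- ===== SOURCE B (Python) =====
-- def aggregate_citations(chunks):
--     # Back-to-front traversal: walk the chunks in reverse, and at each step
--     # prepend the citation and filter every later duplicate of it out of the
--     # accumulated list; no seen-set, dedup happens by filtering.
--     parts = []
--     for chunk in reversed(chunks):
--         cite = "[{}] (Pages {}\u2013{})".format(
--             chunk.get('file_name', 'Unknown'),
--             chunk.get('start_file', '?'),
--             chunk.get('end_file', '?'))
--         parts = [cite] + [x for x in parts if x != cite]
--     return "Sources: " + ", ".join(parts) if parts else "Sources: None"
-- ===== Notes on version B (the rewrite author's own statement) =====
-- stated objective: alternative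
-- what changed: Replaces the forward loop with a seen-set and guarded append by a back-to-front traversal that prepends each citation and deduplicates by filtering its later duplicates out of the accumulated list, eliminating the seen-set and the membership-test branch.
import Mathlib
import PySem

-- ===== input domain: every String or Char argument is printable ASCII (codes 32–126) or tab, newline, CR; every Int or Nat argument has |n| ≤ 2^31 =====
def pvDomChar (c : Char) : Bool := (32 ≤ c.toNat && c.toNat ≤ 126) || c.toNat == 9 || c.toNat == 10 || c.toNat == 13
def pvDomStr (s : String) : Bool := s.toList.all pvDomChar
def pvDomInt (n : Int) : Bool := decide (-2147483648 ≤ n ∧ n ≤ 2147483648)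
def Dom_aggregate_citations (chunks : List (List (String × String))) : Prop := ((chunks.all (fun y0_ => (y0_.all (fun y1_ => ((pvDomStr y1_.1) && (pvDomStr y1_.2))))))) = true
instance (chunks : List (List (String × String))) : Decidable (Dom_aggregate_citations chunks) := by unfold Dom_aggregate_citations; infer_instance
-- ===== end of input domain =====

-- B replaces A's forward loop with a seen-set and guarded append by a back-to-front
-- traversal that deduplicates by filtering later duplicates out of the accumulator;
-- objective: alternative (no seen-set, no membership guard).

-- ===== PORT A =====
-- one fused forward loop: seen set + guarded append to citations
def aggregate_citations (chunks : List (List (String × String))) : String :=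
  let r := chunks.foldl (fun (st : List String × List String) chunk =>
    let seen := st.1
    let citations := st.2
    let file_name := PySem.Dict.getD (PySem.Dict.mk chunk) "file_name" "Unknown"
    let page_start := PySem.Dict.getD (PySem.Dict.mk chunk) "start_file" "?"
    let page_end := PySem.Dict.getD (PySem.Dict.mk chunk) "end_file" "?"
    let citation := "[" ++ file_name ++ "] (Pages " ++ page_start ++ "–" ++ page_end ++ ")"
    if PySem.Set.contains seen citation then (seen, citations)
    else (PySem.Set.add seen citation, citations ++ [citation])) ([], [])
  if !r.2.isEmpty then "Sources: " ++ PySem.Str.join ", " r.2 else "Sources: None"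

-- ===== PORT B =====
-- the .format call, as a helper
def fmtCitation_alt (chunk : List (String × String)) : String :=
  "[" ++ PySem.Dict.getD (PySem.Dict.mk chunk) "file_name" "Unknown" ++ "] (Pages " ++
    PySem.Dict.getD (PySem.Dict.mk chunk) "start_file" "?" ++ "–" ++ PySem.Dict.getD (PySem.Dict.mk chunk) "end_file" "?" ++ ")"

-- back-to-front: prepend the citation and filter its later duplicates out of parts
def aggregate_citations_alt (chunks : List (List (String × String))) : String :=
  let parts := chunks.reverse.foldl (fun (parts : List String) chunk =>
    let cite := fmtCitation_alt chunk
    cite :: parts.filter (fun x => x ≠ cite)) []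
  if !parts.isEmpty then "Sources: " ++ PySem.Str.join ", " parts else "Sources: None"

-- ===== PRECONDITION & SPEC =====
def Spec_aggregate_citations (chunks : List (List (String × String))) (out : String) : Prop := out = aggregate_citations_alt chunks
instance (chunks : List (List (String × String))) (out : String) : Decidable (Spec_aggregate_citations chunks out) := by unfold Spec_aggregate_citations; infer_instance

-- ===== CLAIM (what is proved, stated in full; the proofs are below) =====
def Claim_equal_aggregate_citations : Prop := ∀ (chunks : List (List (String × String))), Dom_aggregate_citations chunks → Spec_aggregate_citations chunks (aggregate_citations chunks)

-- ===== LEMMAS AND PROOFS =====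

-- B's foldr-shaped accumulator, as a function of the formatted strings
def pvF (l : List String) : List String :=
  l.foldr (fun x r => x :: r.filter (fun y => y ≠ x)) []

-- A's fused loop keeps seen = citations; both equal the foldl of Set.add over the formatted strings
theorem pv_loop (l : List (List (String × String))) (s : List String) :
    l.foldl (fun (st : List String × List String) chunk =>
      let seen := st.1
      let citations := st.2
      let file_name := PySem.Dict.getD (PySem.Dict.mk chunk) "file_name" "Unknown"
      let page_start := PySem.Dict.getD (PySem.Dict.mk chunk) "start_file" "?"
      let page_end := PySem.Dict.getD (PySem.Dict.mk chunk) "end_file" "?"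
      let citation := "[" ++ file_name ++ "] (Pages " ++ page_start ++ "–" ++ page_end ++ ")"
      if PySem.Set.contains seen citation then (seen, citations)
      else (PySem.Set.add seen citation, citations ++ [citation])) (s, s)
      = (l.foldl (fun a c => PySem.Set.add a (fmtCitation_alt c)) s,
         l.foldl (fun a c => PySem.Set.add a (fmtCitation_alt c)) s) := by
  induction l generalizing s with
  | nil => rfl
  | cons c t ih =>
      simp only [List.foldl_cons]
      rw [← ih]
      congr 1
      simp only [fmtCitation_alt, PySem.Set.add]
      split <;> rename_i h <;> simp

theorem pvF_cons (x : String) (t : List String) :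
    pvF (x :: t) = x :: (pvF t).filter (fun y => y ≠ x) := rfl

-- the seen-set fold equals pvF, up to elements already seen
theorem foldl_add_pvF (l s : List String) :
    l.foldl PySem.Set.add s = s ++ (pvF l).filter (fun y => decide (y ∉ s)) := by
  induction l generalizing s with
  | nil => simp [pvF]
  | cons x t ih =>
      rw [List.foldl_cons, pvF_cons]
      by_cases hx : x ∈ s
      · have hadd : PySem.Set.add s x = s := by simp [PySem.Set.add, hx]
        rw [hadd, ih, List.filter_cons_of_neg (by simp [hx])]
        congr 1
        rw [List.filter_filter]
        apply List.filter_congr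
        intro y _
        by_cases hy : y = x <;> simp [hy, hx]
      · have hadd : PySem.Set.add s x = s ++ [x] := by simp [PySem.Set.add, hx]
        rw [hadd, ih, List.filter_cons_of_pos (by simp [hx]), List.append_assoc]
        congr 1
        rw [List.singleton_append]
        congr 1
        rw [List.filter_filter]
        apply List.filter_congr
        intro y _
        by_cases hy : y = x <;> simp [hy, hx]

theorem ofList_eq_pvF (l : List String) : l.foldl PySem.Set.add [] = pvF l := by
  rw [foldl_add_pvF]; simp

theorem aggregate_citations_eq (chunks : List (List (String × String))) :
    aggregate_citations chunks = aggregate_citations_alt chunks := by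
  unfold aggregate_citations aggregate_citations_alt
  rw [pv_loop, List.foldl_reverse]
  have h1 : chunks.foldl (fun a c => PySem.Set.add a (fmtCitation_alt c)) [] =
      (chunks.map fmtCitation_alt).foldl PySem.Set.add [] := by
    rw [List.foldl_map]
  have h2 : chunks.foldr (fun c parts =>
        fmtCitation_alt c :: parts.filter (fun x => x ≠ fmtCitation_alt c)) [] =
      pvF (chunks.map fmtCitation_alt) := by
    rw [pvF, List.foldr_map]
  simp only [h1, ofList_eq_pvF, h2]

-- ===== VERDICT (by name: the statement is the Claim_ definition above) =====
theorem aggregate_citations_spec : Claim_equal_aggregate_citations := by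
  intro chunks _
  exact aggregate_citations_eq chunks
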